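-- pv_equiv track=rewrite | github.com/skpark597/algorithm | python/src/year_twenty_four/december/maximum_distance_in_arrays.py | max_distance_old
-- ===== SOURCE A (Python) =====
-- import heapq
--
-- def max_distance_old(arrays: list[list[int]]) -> int:
--     result, first_nums, final_nums = 0, [], []
--
--     for i, array in enumerate(arrays):
--         heapq.heappush(first_nums, (array[0], i))
--         heapq.heappush(final_nums, (-array[-1], i))
--
--     first_min0, idx0 = heapq.heappop(first_nums)
--     final_max0, idx1 = heapq.heappop(final_nums)
--
--     if idx0 != idx1:
--         result = -final_max0 - first_min0
--     else:
--         first_min1, _ = heapq.heappop(first_nums)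
--         final_max1, _ = heapq.heappop(final_nums)
--         result = max(-final_max0 - first_min1, -final_max1 - first_min0)
--
--     return result
-- ===== SOURCE B (Python) =====
-- def max_distance_old(arrays: list[list[int]]) -> int:
--     # One pass: track the two lexicographically smallest (first, i) pairs and
--     # the two smallest (-last, i) pairs; no heaps, no extra lists.
--     f1 = f2 = l1 = l2 = None
--     for i, array in enumerate(arrays):
--         f = (array[0], i)
--         if f1 is None or f < f1:
--             f1, f2 = f, f1
--         elif f2 is None or f < f2:
--             f2 = f
--         l = (-array[-1], i)
--         if l1 is None or l < l1:
--             l1, l2 = l, l1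
--         elif l2 is None or l < l2:
--             l2 = l
--     if f1[1] != l1[1]:
--         return -l1[0] - f1[0]
--     return max(-l1[0] - f2[0], -l2[0] - f1[0])
-- ===== Notes on version B (the rewrite author's own statement) =====
-- stated objective: alternative
-- what changed: Replaces the two heaps (n pushes plus up to two pops each) by a single pass that keeps the two lexicographically smallest (first,i) and (-last,i) pairs in four scalar slots.
import Mathlib
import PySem

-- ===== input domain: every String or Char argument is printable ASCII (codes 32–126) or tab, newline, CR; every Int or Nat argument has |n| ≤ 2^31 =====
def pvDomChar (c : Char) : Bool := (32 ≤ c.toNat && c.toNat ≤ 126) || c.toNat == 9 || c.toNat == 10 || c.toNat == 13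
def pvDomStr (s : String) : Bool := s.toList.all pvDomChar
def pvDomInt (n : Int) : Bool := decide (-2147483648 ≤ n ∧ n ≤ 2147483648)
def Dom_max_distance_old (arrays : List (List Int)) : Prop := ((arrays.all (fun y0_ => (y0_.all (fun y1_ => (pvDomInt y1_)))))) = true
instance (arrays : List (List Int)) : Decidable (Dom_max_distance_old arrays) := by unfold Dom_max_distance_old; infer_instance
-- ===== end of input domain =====

-- B replaces A's two heaps by one pass keeping the two smallest (first,i) / (-last,i) pairs in four slots.


-- ===== PORT A =====
-- Python tuple comparison (v, i) < (w, j), as a Bool.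
def pairLt (p q : Int × Int) : Bool := p.1 < q.1 || (p.1 == q.1 && p.2 < q.2)

-- heapq model: the heap is the multiset of pushed pairs (push = append);
-- heappop returns the lexicographically smallest pair (first occurrence) and the rest —
-- exactly what heapq's pop yields for these totally ordered tuples.
def popMin : List (Int × Int) → Option ((Int × Int) × List (Int × Int))
  | [] => none
  | x :: xs =>
    match popMin xs with
    | none => some (x, [])
    | some (m, r) => if pairLt m x then some (m, x :: r) else some (x, xs)

def max_distance_old (arrays : List (List Int)) : Int :=
  -- the loop: push (array[0], i) and (-array[-1], i); array[0]/array[-1] via pyGet?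
  -- (Pre_ excludes empty inner lists, where Python raises IndexError)
  let st := arrays.foldl
    (fun (st : (List (Int × Int) × List (Int × Int)) × Int) a =>
      ((st.1.1 ++ [((PySem.List.pyGet? a 0).getD 0, st.2)],
        st.1.2 ++ [(-((PySem.List.pyGet? a (-1)).getD 0), st.2)]), st.2 + 1))
    (([], []), 0)
  match popMin st.1.1, popMin st.1.2 with
  | some ((first_min0, idx0), fn), some ((final_max0, idx1), ln) =>
    if idx0 ≠ idx1 then -final_max0 - first_min0
    else
      match popMin fn, popMin ln with
      | some ((first_min1, _), _), some ((final_max1, _), _) =>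
        max (-final_max0 - first_min1) (-final_max1 - first_min0)
      | _, _ => 0   -- Python pops an empty heap here (IndexError); excluded by Pre_
  | _, _ => 0       -- fewer than one array: Python raises; excluded by Pre_

-- ===== PORT B =====
-- Python tuple comparison (v, i) < (w, j) for B (B-local; A's ports share nothing with B's)
def pairLtB (p q : Int × Int) : Bool := decide (p.1 < q.1) || (decide (p.1 = q.1) && decide (p.2 < q.2))

-- one update step of B's four slots (f1,f2) (resp. (l1,l2)) with a new pair x
def ins2 (s : Option (Int × Int) × Option (Int × Int)) (x : Int × Int) :
    Option (Int × Int) × Option (Int × Int) :=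
  if s.1.isNone then (some x, s.1)           -- f1 is None: f1, f2 = f, f1
  else
    let a := s.1.getD (0, 0)
    if pairLtB x a then (some x, some a)     -- f < f1: f1, f2 = f, f1
    else if s.2.isNone then (some a, some x) -- f2 is None: f2 = f
    else if pairLtB x (s.2.getD (0, 0)) then (some a, some x) else s

def max_distance_old_alt (arrays : List (List Int)) : Int :=
  let st := arrays.foldl
    (fun (st : ((Option (Int × Int) × Option (Int × Int)) ×
                (Option (Int × Int) × Option (Int × Int))) × Int) a =>
      ((ins2 st.1.1 ((PySem.List.pyGet? a 0).getD 0, st.2),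
        ins2 st.1.2 (-((PySem.List.pyGet? a (-1)).getD 0), st.2)), st.2 + 1))
    (((none, none), (none, none)), 0)
  -- Python B indexes the slot tuples directly; on slots still None it raises — excluded by Pre_
  let f1 := st.1.1.1.getD (0, 0)
  let f2 := st.1.1.2.getD (0, 0)
  let l1 := st.1.2.1.getD (0, 0)
  let l2 := st.1.2.2.getD (0, 0)
  if f1.2 ≠ l1.2 then -l1.1 - f1.1
  else max (-l1.1 - f2.1) (-l2.1 - f1.1)

-- ===== PRECONDITION & SPEC =====
-- Pre_ is exactly where Python A returns: with < 2 arrays or an empty inner list it raises IndexError.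
def Pre_max_distance_old (arrays : List (List Int)) : Prop :=
  2 ≤ arrays.length ∧ ∀ a ∈ arrays, a ≠ []
instance (arrays : List (List Int)) : Decidable (Pre_max_distance_old arrays) := by
  unfold Pre_max_distance_old; infer_instance

def pvWitness_max_distance_old : List (List Int) := [[1, 4], [0, 5]]

def Spec_max_distance_old (arrays : List (List Int)) (out : Int) : Prop := out = max_distance_old_alt arrays
instance (arrays : List (List Int)) (out : Int) : Decidable (Spec_max_distance_old arrays out) := by unfold Spec_max_distance_old; infer_instance

-- ===== CLAIM (what is proved, stated in full; the proofs are below) =====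
def Claim_equal_max_distance_old : Prop := ∀ (arrays : List (List Int)), Dom_max_distance_old arrays → Pre_max_distance_old arrays → Spec_max_distance_old arrays (max_distance_old arrays)

-- ===== LEMMAS AND PROOFS =====

-- basic order facts about pairLt
theorem pairLt_iff (p q : Int × Int) :
    pairLt p q = true ↔ (p.1 < q.1 ∨ (p.1 = q.1 ∧ p.2 < q.2)) := by
  simp [pairLt]

theorem pairLtB_eq (p q : Int × Int) : pairLtB p q = pairLt p q := rfl

theorem pairLt_trans {p q r : Int × Int} (h1 : pairLt p q = true) (h2 : pairLt q r = true) :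
    pairLt p r = true := by
  rw [pairLt_iff] at *; omega

theorem pairLt_asymm {p q : Int × Int} (h : pairLt p q = true) : pairLt q p = false := by
  rw [pairLt_iff] at h
  rw [Bool.eq_false_iff, ne_eq, pairLt_iff]; omega

theorem pairLt_total {p q : Int × Int} (h : p ≠ q) :
    pairLt p q = true ∨ pairLt q p = true := by
  rcases p with ⟨a, b⟩; rcases q with ⟨c, d⟩
  rw [pairLt_iff, pairLt_iff]
  simp only [Ne, Prod.mk.injEq, not_and] at h
  simp only []
  omega

-- "s holds the two lexicographically smallest elements of L"
def IsTwo (L : List (Int × Int)) (s : Option (Int × Int) × Option (Int × Int)) : Prop :=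
  match s with
  | (none, none) => L = []
  | (some a, none) => L = [a]
  | (some a, some b) =>
      a ∈ L ∧ b ∈ L ∧ a ≠ b ∧ pairLt a b = true ∧
      ∀ y ∈ L, y ≠ a → y ≠ b → pairLt b y = true
  | (none, some _) => False

theorem isTwo_min {L : List (Int × Int)} {a b : Int × Int}
    (h : IsTwo L (some a, some b)) : ∀ y ∈ L, y ≠ a → pairLt a y = true := by
  obtain ⟨-, -, -, hab, hb⟩ := h
  intro y hy hya
  by_cases hyb : y = b
  · rw [hyb]; exact hab
  · exact pairLt_trans hab (hb y hy hya hyb)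

theorem isTwo_unique {L : List (Int × Int)} {a b a' b' : Int × Int}
    (h : IsTwo L (some a, some b)) (h' : IsTwo L (some a', some b')) :
    a = a' ∧ b = b' := by
  have haa : a = a' := by
    by_contra hne
    have h1 := isTwo_min h a' h'.1 (fun e => hne e.symm)
    have h2 := isTwo_min h' a h.1 hne
    have := pairLt_asymm h1
    rw [this] at h2; exact Bool.false_ne_true h2
  have hbb : b = b' := by
    by_contra hne
    have hb'a : b' ≠ a := by rw [haa]; exact fun e => h'.2.2.1 e.symm
    have hba' : b ≠ a' := by rw [← haa]; exact fun e => h.2.2.1 e.symm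
    have h1 : pairLt b b' = true := h.2.2.2.2 b' h'.2.1 hb'a (fun e => hne e.symm)
    have h2 : pairLt b' b = true := h'.2.2.2.2 b h.2.1 hba' (fun e => hne e)
    have := pairLt_asymm h1
    rw [this] at h2; exact Bool.false_ne_true h2
  exact ⟨haa, hbb⟩

-- the two derived pair lists, starting at index i
def pairsFrom (g : List Int → Int) : List (List Int) → Int → List (Int × Int)
  | [], _ => []
  | a :: rest, i => (g a, i) :: pairsFrom g rest (i + 1)

theorem pairsFrom_length (g : List Int → Int) (l : List (List Int)) :
    ∀ i, (pairsFrom g l i).length = l.length := by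
  induction l with
  | nil => intro i; rfl
  | cons a rest ih => intro i; simp [pairsFrom, ih]

theorem pairsFrom_idx_lt (g : List Int → Int) (l : List (List Int)) :
    ∀ i, ∀ p ∈ pairsFrom g l i, i ≤ p.2 := by
  induction l with
  | nil => intro i p hp; simp [pairsFrom] at hp
  | cons a rest ih =>
    intro i p hp
    simp only [pairsFrom, List.mem_cons] at hp
    rcases hp with rfl | hp
    · exact le_refl _
    · have := ih (i + 1) p hp; omega

-- A-side fold builds exactly the two pair lists
theorem foldA_eq (l : List (List Int)) :
    ∀ (u v : List (Int × Int)) (i : Int),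
      l.foldl
        (fun (st : (List (Int × Int) × List (Int × Int)) × Int) a =>
          ((st.1.1 ++ [((PySem.List.pyGet? a 0).getD 0, st.2)],
            st.1.2 ++ [(-((PySem.List.pyGet? a (-1)).getD 0), st.2)]), st.2 + 1))
        ((u, v), i)
      = ((u ++ pairsFrom (fun a => (PySem.List.pyGet? a 0).getD 0) l i,
          v ++ pairsFrom (fun a => -((PySem.List.pyGet? a (-1)).getD 0)) l i),
         i + l.length) := by
  induction l with
  | nil => intro u v i; simp [pairsFrom]
  | cons a rest ih =>
    intro u v i
    simp only [List.foldl_cons, pairsFrom, ih]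
    refine Prod.ext (Prod.ext ?_ ?_) ?_
    · simp
    · simp
    · simp only [List.length_cons]; push_cast; ring

-- B-side fold is the ins2-fold over the same two pair lists
theorem foldB_eq (l : List (List Int)) :
    ∀ (s t : Option (Int × Int) × Option (Int × Int)) (i : Int),
      l.foldl
        (fun (st : ((Option (Int × Int) × Option (Int × Int)) ×
                    (Option (Int × Int) × Option (Int × Int))) × Int) a =>
          ((ins2 st.1.1 ((PySem.List.pyGet? a 0).getD 0, st.2),
            ins2 st.1.2 (-((PySem.List.pyGet? a (-1)).getD 0), st.2)), st.2 + 1))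
        ((s, t), i)
      = ((List.foldl ins2 s (pairsFrom (fun a => (PySem.List.pyGet? a 0).getD 0) l i),
          List.foldl ins2 t (pairsFrom (fun a => -((PySem.List.pyGet? a (-1)).getD 0)) l i)),
         i + l.length) := by
  induction l with
  | nil => intro s t i; simp [pairsFrom]
  | cons a rest ih =>
    intro s t i
    simp only [List.foldl_cons, pairsFrom, ih]
    refine Prod.ext (Prod.ext ?_ ?_) ?_
    · simp
    · simp
    · simp only [List.length_cons]; push_cast; ring

-- inserting a fresh element preserves IsTwo
theorem ins2_isTwo {L : List (Int × Int)} {s : Option (Int × Int) × Option (Int × Int)}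
    {x : Int × Int} (h : IsTwo L s) (hx : ∀ y ∈ L, y ≠ x) :
    IsTwo (L ++ [x]) (ins2 s x) := by
  obtain ⟨s1, s2⟩ := s
  cases s1 with
  | none =>
    cases s2 with
    | none =>
      have hL : L = [] := h
      subst hL
      show ([] ++ [x] : List (Int × Int)) = [x]
      rfl
    | some b => exact absurd h (by simp [IsTwo])
  | some a =>
    cases s2 with
    | none =>
      have hL : L = [a] := h
      subst hL
      have hax : a ≠ x := hx a (by simp)
      show IsTwo ([a] ++ [x]) (ins2 (some a, none) x)
      simp only [ins2, pairLtB_eq, Option.isNone_some, Option.isNone_none, Option.getD_some,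
        if_true, if_false, Bool.false_eq_true]
      by_cases hc : pairLt x a = true
      · rw [if_pos hc]
        exact ⟨by simp, by simp, fun e => hax e.symm, hc,
          fun y hy hyx hya => by simp at hy; rcases hy with rfl | rfl <;> simp_all⟩
      · rw [if_neg hc]
        have hax' : pairLt a x = true := by
          rcases pairLt_total hax with h' | h'
          · exact h'
          · exact absurd h' hc
        exact ⟨by simp, by simp, hax, hax',
          fun y hy hya hyx => by simp at hy; rcases hy with rfl | rfl <;> simp_all⟩
    | some b =>
      obtain ⟨haL, hbL, hab, haltb, hmax⟩ := h
      have hax : a ≠ x := hx a haL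
      have hbx : b ≠ x := hx b hbL
      show IsTwo (L ++ [x]) (ins2 (some a, some b) x)
      simp only [ins2, pairLtB_eq, Option.isNone_some, Option.getD_some,
        if_false, Bool.false_eq_true]
      by_cases h1 : pairLt x a = true
      · rw [if_pos h1]
        refine ⟨by simp, by simp [haL], fun e => hax e.symm, h1, ?_⟩
        intro y hy hyx hya
        rcases List.mem_append.mp hy with hyL | hmem
        · by_cases hyb : y = b
          · subst hyb; exact haltb
          · exact pairLt_trans haltb (hmax y hyL hya hyb)
        · simp at hmem; exact absurd hmem hyx
      · rw [if_neg h1]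
        have hax' : pairLt a x = true := by
          rcases pairLt_total hax with h' | h'
          · exact h'
          · exact absurd h' h1
        by_cases h2 : pairLt x b = true
        · rw [if_pos h2]
          refine ⟨by simp [haL], by simp, hax, hax', ?_⟩
          intro y hy hya hyx
          rcases List.mem_append.mp hy with hyL | hmem
          · by_cases hyb : y = b
            · subst hyb; exact h2
            · exact pairLt_trans h2 (hmax y hyL hya hyb)
          · simp at hmem; exact absurd hmem hyx
        · rw [if_neg h2]
          have hbx' : pairLt b x = true := by
            rcases pairLt_total hbx with h' | h'
            · exact h'
            · exact absurd h' h2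
          refine ⟨by simp [haL], by simp [hbL], hab, haltb, ?_⟩
          intro y hy hya hyb
          rcases List.mem_append.mp hy with hyL | hmem
          · exact hmax y hyL hya hyb
          · simp at hmem; subst hmem; exact hbx'

-- folding ins2 over a suffix of fresh, increasing-index pairs keeps IsTwo
theorem foldl_ins2_isTwo (g : List Int → Int) (l : List (List Int)) :
    ∀ (i : Int) (L : List (Int × Int)) (s : Option (Int × Int) × Option (Int × Int)),
      IsTwo L s → (∀ y ∈ L, y.2 < i) →
      IsTwo (L ++ pairsFrom g l i) (List.foldl ins2 s (pairsFrom g l i)) := by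
  induction l with
  | nil => intro i L s h _; simpa [pairsFrom] using h
  | cons a rest ih =>
    intro i L s h hlt
    simp only [pairsFrom, List.foldl_cons]
    have hfresh : ∀ y ∈ L, y ≠ (g a, i) := by
      intro y hy he; have := hlt y hy; rw [he] at this; simp at this
    have h1 := ins2_isTwo h hfresh
    have h2 : ∀ y ∈ L ++ [(g a, i)], y.2 < i + 1 := by
      intro y hy
      rcases List.mem_append.mp hy with hy | hy
      · have := hlt y hy; omega
      · simp at hy; rw [hy]; simp
    have := ih (i + 1) (L ++ [(g a, i)]) _ h1 h2
    simpa using this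

theorem popMin_none_iff (l : List (Int × Int)) : popMin l = none ↔ l = [] := by
  cases l with
  | nil => simp [popMin]
  | cons x xs =>
    simp only [popMin]
    cases h : popMin xs with
    | none => simp
    | some p => obtain ⟨m, r⟩ := p; by_cases hc : pairLt m x = true <;> simp [hc]

-- popMin returns an element together with the rest, as a permutation
theorem popMin_perm {l : List (Int × Int)} {m : Int × Int} {r : List (Int × Int)}
    (h : popMin l = some (m, r)) : (m :: r).Perm l := by
  induction l generalizing m r with
  | nil => simp [popMin] at h
  | cons x xs ih =>
    simp only [popMin] at h
    cases hx : popMin xs with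
    | none =>
      have hxs : xs = [] := (popMin_none_iff xs).mp hx
      subst hxs
      rw [hx] at h
      simp at h
      obtain ⟨rfl, rfl⟩ := h
      exact List.Perm.refl _
    | some p =>
      obtain ⟨m', r'⟩ := p
      rw [hx] at h
      by_cases hc : pairLt m' x = true
      · simp only [hc, if_true] at h
        obtain ⟨rfl, rfl⟩ := h
        exact (List.Perm.swap x m r').trans ((ih hx).cons x)
      · simp only [hc, if_false, Bool.false_eq_true] at h
        obtain ⟨rfl, rfl⟩ := h
        exact List.Perm.refl _

-- on a nodup list, the popped element is the strict minimum
theorem popMin_min {l : List (Int × Int)} (hnd : l.Nodup) {m : Int × Int}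
    {r : List (Int × Int)} (h : popMin l = some (m, r)) :
    ∀ y ∈ l, y ≠ m → pairLt m y = true := by
  induction l generalizing m r with
  | nil => simp [popMin] at h
  | cons x xs ih =>
    rw [List.nodup_cons] at hnd
    simp only [popMin] at h
    cases hx : popMin xs with
    | none =>
      have hxs : xs = [] := (popMin_none_iff xs).mp hx
      subst hxs
      rw [hx] at h
      simp at h
      obtain ⟨rfl, rfl⟩ := h
      intro y hy hym
      simp at hy
      exact absurd hy hym
    | some p =>
      obtain ⟨m', r'⟩ := p
      rw [hx] at h
      have hm'xs : m' ∈ xs := (popMin_perm hx).mem_iff.mp (by simp)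
      by_cases hc : pairLt m' x = true
      · simp only [hc, if_true] at h
        obtain ⟨rfl, rfl⟩ := h
        intro y hy hym
        rcases List.mem_cons.mp hy with rfl | hy
        · exact hc
        · exact ih hnd.2 hx y hy hym
      · simp only [hc, if_false, Bool.false_eq_true] at h
        obtain ⟨rfl, rfl⟩ := h
        have hxm' : x ≠ m' := fun e => hnd.1 (e ▸ hm'xs)
        have hxm'lt : pairLt x m' = true := by
          rcases pairLt_total hxm' with h' | h'
          · exact h'
          · exact absurd h' hc
        intro y hy hym
        rcases List.mem_cons.mp hy with rfl | hy
        · exact absurd rfl hym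
        · by_cases hym' : y = m'
          · subst hym'; exact hxm'lt
          · exact pairLt_trans hxm'lt (ih hnd.2 hx y hy hym')

theorem pairsFrom_nodup (g : List Int → Int) (l : List (List Int)) :
    ∀ i, (pairsFrom g l i).Nodup := by
  induction l with
  | nil => intro i; simp [pairsFrom]
  | cons a rest ih =>
    intro i
    rw [pairsFrom, List.nodup_cons]
    refine ⟨fun hmem => ?_, ih (i + 1)⟩
    have := pairsFrom_idx_lt g rest (i + 1) _ hmem
    simp at this

-- two successive pops of a nodup list yield its two smallest elements
theorem popMin_two {F : List (Int × Int)} (hnd : F.Nodup) (hlen : 2 ≤ F.length) :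
    ∃ m1 r m2 r2, popMin F = some (m1, r) ∧ popMin r = some (m2, r2) ∧
      IsTwo F (some m1, some m2) := by
  cases hF : popMin F with
  | none => rw [popMin_none_iff] at hF; subst hF; simp at hlen
  | some p =>
    obtain ⟨m1, r⟩ := p
    have hperm := popMin_perm hF
    have hrlen : 1 ≤ r.length := by
      have := hperm.length_eq; simp at this; omega
    have hndr : (m1 :: r).Nodup := hperm.nodup_iff.mpr hnd
    cases hr : popMin r with
    | none => rw [popMin_none_iff] at hr; subst hr; simp at hrlen
    | some q =>
      obtain ⟨m2, r2⟩ := q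
      have hm1F : m1 ∈ F := hperm.mem_iff.mp (by simp)
      have hm2r : m2 ∈ r := (popMin_perm hr).mem_iff.mp (by simp)
      have hm2F : m2 ∈ F := hperm.mem_iff.mp (by simp [hm2r])
      have hm1r : m1 ∉ r := (List.nodup_cons.mp hndr).1
      have hne : m1 ≠ m2 := fun e => hm1r (e ▸ hm2r)
      have hndr2 : r.Nodup := (List.nodup_cons.mp hndr).2
      refine ⟨m1, r, m2, r2, rfl, hr, hm1F, hm2F, hne,
        popMin_min hnd hF m2 hm2F (fun e => hne e.symm), ?_⟩
      intro y hy hy1 hy2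
      have hyr : y ∈ r := by
        rcases List.mem_cons.mp (hperm.mem_iff.mpr hy) with rfl | h'
        · exact absurd rfl hy1
        · exact h'
      exact popMin_min hndr2 hr y hyr hy2

-- main bridge: both final computations agree
theorem max_distance_old_eq (arrays : List (List Int))
    (hpre : Pre_max_distance_old arrays) :
    max_distance_old arrays = max_distance_old_alt arrays := by
  obtain ⟨hlen, -⟩ := hpre
  simp only [max_distance_old, max_distance_old_alt, foldA_eq, foldB_eq]
  simp only [List.nil_append]
  set F := pairsFrom (fun a => (PySem.List.pyGet? a 0).getD 0) arrays 0 with hFdef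
  set L := pairsFrom (fun a => -((PySem.List.pyGet? a (-1)).getD 0)) arrays 0 with hLdef
  have hFlen : 2 ≤ F.length := by rw [hFdef, pairsFrom_length]; exact hlen
  have hLlen : 2 ≤ L.length := by rw [hLdef, pairsFrom_length]; exact hlen
  have hFnd : F.Nodup := hFdef ▸ pairsFrom_nodup _ arrays 0
  have hLnd : L.Nodup := hLdef ▸ pairsFrom_nodup _ arrays 0
  obtain ⟨f1, fr, f2, fr2, hF, hFr, hFtwo⟩ := popMin_two hFnd hFlen
  obtain ⟨l1, lr, l2, lr2, hL, hLr, hLtwo⟩ := popMin_two hLnd hLlen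
  have hBF := foldl_ins2_isTwo (fun a => (PySem.List.pyGet? a 0).getD 0) arrays 0 []
    (none, none) rfl (by simp)
  have hBL := foldl_ins2_isTwo (fun a => -((PySem.List.pyGet? a (-1)).getD 0)) arrays 0 []
    (none, none) rfl (by simp)
  rw [List.nil_append, ← hFdef] at hBF
  rw [List.nil_append, ← hLdef] at hBL
  rcases hsF : List.foldl ins2 ((none, none) : Option (Int × Int) × Option (Int × Int)) F
    with ⟨sF1, sF2⟩
  rcases hsL : List.foldl ins2 ((none, none) : Option (Int × Int) × Option (Int × Int)) L
    with ⟨sL1, sL2⟩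
  rw [hsF] at hBF
  rw [hsL] at hBL
  cases sF1 with
  | none =>
    cases sF2 with
    | none => rw [show F = [] from hBF] at hFlen; simp at hFlen
    | some _ => exact absurd hBF (by simp [IsTwo])
  | some a =>
    cases sF2 with
    | none => rw [show F = [a] from hBF] at hFlen; simp at hFlen
    | some b =>
      cases sL1 with
      | none =>
        cases sL2 with
        | none => rw [show L = [] from hBL] at hLlen; simp at hLlen
        | some _ => exact absurd hBL (by simp [IsTwo])
      | some c =>
        cases sL2 with
        | none => rw [show L = [c] from hBL] at hLlen; simp at hLlen
        | some d =>
          obtain ⟨haf1, hbf2⟩ := isTwo_unique hBF hFtwo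
          obtain ⟨hcl1, hdl2⟩ := isTwo_unique hBL hLtwo
          subst haf1 hbf2 hcl1 hdl2
          obtain ⟨f1v, f1i⟩ := a
          obtain ⟨f2v, f2i⟩ := b
          obtain ⟨l1v, l1i⟩ := c
          obtain ⟨l2v, l2i⟩ := d
          rw [hF, hL]
          dsimp only
          rw [hFr, hLr]
          rfl

-- ===== VERDICT (by name: the statement is the Claim_ definition above) =====
theorem max_distance_old_spec : Claim_equal_max_distance_old := by
  intro arrays _ hpre
  unfold Spec_max_distance_old
  exact max_distance_old_eq arrays hpre
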